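-- pv_equiv track=rewrite | github.com/jilwang84/M-DESIGN | graph_comparison/graph_comparison.py | rank_datasets_by_property
-- ===== SOURCE A (Python) =====
-- def rank_datasets_by_property(dataset_properties, feature_names):
--     """
--     Rank datasets for each property.
--
--     Args:
--         dataset_properties (dict): Mapping from dataset name to properties dictionary.
--         feature_names (list): List of feature names to consider.
--
--     Returns:
--         dict: Mapping from property name to list of (dataset_name, rank).
--     """
--     property_ranks = {}
--     for feature in feature_names:
--         # Collect values for the feature
--         dataset_values = []
--         for name, properties in dataset_properties.items():
--             value = properties.get(feature, None)
--             if value is not None: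
--                 dataset_values.append((name, value))
--             else:
--                 raise ValueError(f"Dataset {name} is missing property {feature}")
--         # Sort datasets based on the property value
--         # For ascending order, use reverse=False
--         dataset_values.sort(key=lambda x: x[1], reverse=False)
--         # Assign ranks (starting from 1)
--         ranks = {}
--         current_rank = 1
--         for i, (name, value) in enumerate(dataset_values):
--             if i > 0 and value == dataset_values[i - 1][1]:
--                 # Handle ties by assigning the same rank
--                 ranks[name] = ranks[dataset_values[i - 1][0]]
--             else:
--                 ranks[name] = current_rank
--             current_rank += 1
--         property_ranks[feature] = ranks
--     return property_ranks
-- ===== SOURCE B (Python) =====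
-- def rank_datasets_by_property(dataset_properties, feature_names):
--     """Rank datasets for each property (competition ranking via strict-less counting)."""
--     property_ranks = {}
--     for feature in feature_names:
--         pairs = []
--         for name, properties in dataset_properties.items():
--             value = properties.get(feature, None)
--             if value is None:
--                 raise ValueError(f"Dataset {name} is missing property {feature}")
--             pairs.append((name, value))
--         # rank = 1 + number of strictly smaller values; emitted in value-sorted order
--         property_ranks[feature] = {
--             name: 1 + sum(1 for _, w in pairs if w < v)
--             for name, v in sorted(pairs, key=lambda p: p[1])
--         }
--     return property_ranks
-- ===== Notes on version B (the rewrite author's own statement) =====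
-- stated objective: simpler
-- what changed: B drops A's positional rank assignment (enumerate with index look-back into the sorted list, a tie branch reading the previous dataset's rank out of the dict, and a separately maintained current_rank counter) and instead computes each rank directly as 1 + the number of strictly smaller collected values, emitted in value-sorted order.
-- outside the precondition, e.g. on rank_datasets_by_property({'a': {'f': 1}}, ['f', 'g']): A raises ValueError, B raises ValueError
import Mathlib
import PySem

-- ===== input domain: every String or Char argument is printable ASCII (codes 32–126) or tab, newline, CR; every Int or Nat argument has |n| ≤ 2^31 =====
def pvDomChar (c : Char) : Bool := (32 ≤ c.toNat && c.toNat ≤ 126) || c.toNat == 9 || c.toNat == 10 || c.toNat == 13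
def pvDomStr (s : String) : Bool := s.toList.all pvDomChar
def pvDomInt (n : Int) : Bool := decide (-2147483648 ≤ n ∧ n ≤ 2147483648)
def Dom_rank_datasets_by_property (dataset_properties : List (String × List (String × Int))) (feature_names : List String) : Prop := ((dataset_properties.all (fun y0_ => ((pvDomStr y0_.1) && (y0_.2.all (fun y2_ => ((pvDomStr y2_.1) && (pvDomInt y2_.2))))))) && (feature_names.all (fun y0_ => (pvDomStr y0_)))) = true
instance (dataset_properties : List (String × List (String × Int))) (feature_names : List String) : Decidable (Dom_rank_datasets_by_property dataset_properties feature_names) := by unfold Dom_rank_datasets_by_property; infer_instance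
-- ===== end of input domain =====

-- B replaces A's positional rank assignment with tie look-back by direct competition
-- ranking (1 + number of strictly smaller values); objective: simpler.

-- ===== PORT A =====
-- collect (name, value) pairs for one feature; on a missing property Python raises
-- ValueError (excluded by Pre_): the port skips that dataset there.
def pvCollect (dataset_properties : List (String × List (String × Int))) (feature : String) : List (String × Int) :=
  dataset_properties.foldl (fun dv p =>
    match (PySem.Dict.mk p.2).get? feature with
    | some value => dv ++ [(p.1, value)]
    | none => dv) []

def rank_datasets_by_property (dataset_properties : List (String × List (String × Int))) (feature_names : List String) : List (String × List (String × Int)) :=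
  (feature_names.foldl (fun property_ranks feature =>
      let dataset_values := pvCollect dataset_properties feature
      let dataset_values := PySem.List.sorted dataset_values (fun x => x.2) false
      let ranks :=
        ((PySem.List.enumerate dataset_values).foldl
          (fun (st : PySem.Dict String Int × Int) iv =>
            let i := iv.1; let name := iv.2.1; let value := iv.2.2
            let ranks :=
              if 0 < i ∧ value = (PySem.List.pyGetD dataset_values (i - 1) ("", 0)).2 then
                -- ranks[dataset_values[i-1][0]]: the key was inserted one step earlier
                st.1.insert name (st.1.getD (PySem.List.pyGetD dataset_values (i - 1) ("", 0)).1 0)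
              else
                st.1.insert name st.2
            (ranks, st.2 + 1))
          (PySem.Dict.empty, (1 : Int))).1
      property_ranks.insert feature ranks.items)
    PySem.Dict.empty).items

-- ===== PORT B =====
def rank_datasets_by_property_alt (dataset_properties : List (String × List (String × Int))) (feature_names : List String) : List (String × List (String × Int)) :=
  (feature_names.foldl (fun property_ranks feature =>
      let pairs := pvCollect dataset_properties feature
      property_ranks.insert feature
        ((PySem.List.sorted pairs (fun p => p.2) false).foldl
          (fun d q => d.insert q.1 (1 + (pairs.countP (fun r => decide (r.2 < q.2)) : Int)))
          PySem.Dict.empty).items)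
    PySem.Dict.empty).items

-- ===== PRECONDITION & SPEC =====
-- Pre_ excludes (a) inputs where some dataset is missing a requested feature, on which
-- A raises ValueError, and (b) association lists with duplicate dataset names or
-- duplicate property keys, which correspond to no Python dict input (dict construction
-- collapses duplicates), so A's behaviour there is accidental.
def Pre_rank_datasets_by_property (dataset_properties : List (String × List (String × Int))) (feature_names : List String) : Prop :=
  (dataset_properties.map Prod.fst).Nodup ∧
  (∀ p ∈ dataset_properties, (p.2.map Prod.fst).Nodup) ∧
  (∀ f ∈ feature_names, ∀ p ∈ dataset_properties, f ∈ p.2.map Prod.fst)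
instance (dataset_properties : List (String × List (String × Int))) (feature_names : List String) : Decidable (Pre_rank_datasets_by_property dataset_properties feature_names) := by unfold Pre_rank_datasets_by_property; infer_instance

def pvWitness_rank_datasets_by_property : (List (String × List (String × Int))) × List String :=
  ([("a", [("f", 3), ("g", 1)]), ("b", [("f", 3), ("g", 2)]), ("c", [("f", 7), ("g", 0)])], ["f", "g"])

def Spec_rank_datasets_by_property (dataset_properties : List (String × List (String × Int))) (feature_names : List String) (out : List (String × List (String × Int))) : Prop := out = rank_datasets_by_property_alt dataset_properties feature_names
instance (dataset_properties : List (String × List (String × Int))) (feature_names : List String) (out : List (String × List (String × Int))) : Decidable (Spec_rank_datasets_by_property dataset_properties feature_names out) := by unfold Spec_rank_datasets_by_property; infer_instance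

-- ===== CLAIM (what is proved, stated in full; the proofs are below) =====
def Claim_equal_rank_datasets_by_property : Prop := ∀ (dataset_properties : List (String × List (String × Int))) (feature_names : List String), Dom_rank_datasets_by_property dataset_properties feature_names → Pre_rank_datasets_by_property dataset_properties feature_names → Spec_rank_datasets_by_property dataset_properties feature_names (rank_datasets_by_property dataset_properties feature_names)

-- ===== LEMMAS AND PROOFS =====

-- the common rank value: 1 + number of strictly smaller values among `pairs`
def pvRank (pairs : List (String × Int)) (v : Int) : Int :=
  1 + (pairs.countP (fun r => decide (r.2 < v)) : Int)

-- the collected list is a filtered map of the dataset list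
theorem pvCollect_eq (dps : List (String × List (String × Int))) (f : String) :
    pvCollect dps f =
      (dps.filter (fun p => ((PySem.Dict.mk p.2).get? f).isSome)).map
        (fun p => (p.1, ((PySem.Dict.mk p.2).get? f).getD 0)) := by
  unfold pvCollect
  rw [show (fun (dv : List (String × Int)) (p : String × List (String × Int)) =>
      match (PySem.Dict.mk p.2).get? f with
      | some value => dv ++ [(p.1, value)]
      | none => dv)
    = (fun dv p => if ((PySem.Dict.mk p.2).get? f).isSome then
        dv ++ [(p.1, ((PySem.Dict.mk p.2).get? f).getD 0)] else dv) from ?_]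
  · exact (PySem.List.foldl_append_if _ _ dps []).trans (by simp)
  · funext dv p
    cases h : (PySem.Dict.mk p.2).get? f <;> simp

theorem pvCollect_names_nodup (dps : List (String × List (String × Int))) (f : String)
    (h : (dps.map Prod.fst).Nodup) : ((pvCollect dps f).map Prod.fst).Nodup := by
  rw [pvCollect_eq, List.map_map]
  have hcomp : ((dps.filter (fun p => ((PySem.Dict.mk p.2).get? f).isSome)).map
      (Prod.fst ∘ fun p => (p.1, ((PySem.Dict.mk p.2).get? f).getD 0)))
      = ((dps.filter (fun p => ((PySem.Dict.mk p.2).get? f).isSome)).map Prod.fst) := by simp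
  rw [hcomp]
  exact h.sublist (List.Sublist.map _ List.filter_sublist)

-- counting lemma: in a value-sorted list, if position k is not tied with position k-1,
-- the number of strictly smaller values is exactly k
theorem pvCount_eq (s : List (String × Int))
    (hs : List.Pairwise (fun a b => a.2 ≤ b.2) s) (k : Nat) (hk : k < s.length)
    (hnt : k = 0 ∨ s[k].2 ≠ (s[k - 1]'(by omega)).2) :
    s.countP (fun r => decide (r.2 < s[k].2)) = k := by
  have hp := (List.pairwise_iff_getElem).mp hs
  have hlt : ∀ j (hj : j < k), (s[j]'(by omega)).2 < s[k].2 := by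
    intro j hj
    rcases hnt with h0 | hne
    · omega
    · have hk1 : k - 1 < s.length := by omega
      have h1 : (s[k-1]'hk1).2 < s[k].2 :=
        lt_of_le_of_ne (hp (k-1) k hk1 hk (by omega)) (Ne.symm hne)
      rcases Nat.lt_or_ge j (k-1) with hj1 | hj1
      · exact lt_of_le_of_lt (hp j (k-1) (by omega) hk1 hj1) h1
      · have : j = k - 1 := by omega
        subst this; exact h1
  have hge : ∀ j (hj : k + j < s.length), s[k].2 ≤ (s[k+j]'hj).2 := by
    intro j hj
    rcases Nat.eq_zero_or_pos j with rfl | hjp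
    · simp
    · exact hp k (k+j) hk hj (by omega)
  have hsplit := List.take_append_drop k s
  calc s.countP (fun r => decide (r.2 < s[k].2))
      = (s.take k ++ s.drop k).countP (fun r => decide (r.2 < s[k].2)) := by rw [hsplit]
    _ = (s.take k).countP (fun r => decide (r.2 < s[k].2))
        + (s.drop k).countP (fun r => decide (r.2 < s[k].2)) := List.countP_append ..
    _ = k := by
        have h1 : (s.take k).countP (fun r => decide (r.2 < s[k].2)) = k := by
          rw [List.countP_eq_length.mpr, List.length_take]
          · omega
          · intro a ha
            obtain ⟨j, hj, rfl⟩ := List.mem_iff_getElem.mp ha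
            have hjk : j < k := by have := hj; simp [List.length_take] at this; omega
            simpa [List.getElem_take] using hlt j hjk
        have h2 : (s.drop k).countP (fun r => decide (r.2 < s[k].2)) = 0 := by
          rw [List.countP_eq_zero]
          intro a ha
          obtain ⟨j, hj, rfl⟩ := List.mem_iff_getElem.mp ha
          have hjl : k + j < s.length := by have := hj; simp [List.length_drop] at this; omega
          simp only [List.getElem_drop]
          simpa using not_lt.mpr (hge j hjl)
        omega

-- invariant for A's rank-assignment loop over the sorted list
theorem pvLoopA_inv (s : List (String × Int))
    (hs : List.Pairwise (fun a b => a.2 ≤ b.2) s)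
    (hn : (s.map Prod.fst).Nodup) (k : Nat) (hk : k ≤ s.length) :
    ((PySem.List.enumerate (s.drop k) (k : Int)).foldl
      (fun (st : PySem.Dict String Int × Int) iv =>
        let i := iv.1; let name := iv.2.1; let value := iv.2.2
        let ranks :=
          if 0 < i ∧ value = (PySem.List.pyGetD s (i - 1) ("", 0)).2 then
            st.1.insert name (st.1.getD (PySem.List.pyGetD s (i - 1) ("", 0)).1 0)
          else
            st.1.insert name st.2
        (ranks, st.2 + 1))
      (PySem.Dict.mk ((s.take k).map (fun q => (q.1, pvRank s q.2))), (k : Int) + 1)).1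
    = PySem.Dict.mk (s.map (fun q => (q.1, pvRank s q.2))) := by
  have hne := (List.pairwise_iff_getElem).mp hn
  generalize hgen : s.length - k = n
  induction n generalizing k with
  | zero =>
    have hkl : k = s.length := by omega
    subst hkl
    simp [List.drop_length, List.take_length]
  | succ n ih =>
    have hk' : k < s.length := by omega
    rw [List.drop_eq_getElem_cons hk', PySem.List.enumerate_cons, List.foldl_cons]
    -- the new accumulator equals the (k+1)-prefix dictionary
    have hfresh : (PySem.Dict.mk ((s.take k).map (fun q => (q.1, pvRank s q.2)))).contains s[k].1 = false := by
      rw [PySem.Dict.contains_eq_decide_mem_keys, decide_eq_false_iff_not]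
      rw [PySem.Dict.keys_mk, List.map_map]
      intro hmem
      obtain ⟨q, hq, hq1⟩ := List.mem_map.mp hmem
      obtain ⟨j, hj, rfl⟩ := List.mem_iff_getElem.mp hq
      have hjk : j < k := by have := hj; simp [List.length_take] at this; omega
      have : s[j].1 ≠ s[k].1 := by
        have := hne j k (by simp; omega) (by simp; omega) (by omega)
        simpa using this
      exact this (by simpa [List.getElem_take] using hq1)
    have hval : (if 0 < (k : Int) ∧ s[k].2 = (PySem.List.pyGetD s ((k : Int) - 1) ("", 0)).2 then
          (PySem.Dict.mk ((s.take k).map (fun q => (q.1, pvRank s q.2)))).insert s[k].1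
            ((PySem.Dict.mk ((s.take k).map (fun q => (q.1, pvRank s q.2)))).getD
              (PySem.List.pyGetD s ((k : Int) - 1) ("", 0)).1 0)
        else
          (PySem.Dict.mk ((s.take k).map (fun q => (q.1, pvRank s q.2)))).insert s[k].1 ((k : Int) + 1))
        = (PySem.Dict.mk ((s.take k).map (fun q => (q.1, pvRank s q.2)))).insert s[k].1 (pvRank s s[k].2) := by
      split_ifs with hc
      · -- tie branch
        obtain ⟨hk0, htie⟩ := hc
        have hk0' : 0 < k := by exact_mod_cast hk0
        have hcast : (k : Int) - 1 = ((k - 1 : Nat) : Int) := by omega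
        rw [hcast, PySem.List.pyGetD_natCast] at htie ⊢
        have hgd : s.getD (k-1) ("", 0) = s[k-1]'(by omega) := List.getD_eq_getElem s _ (by omega)
        rw [hgd] at htie ⊢
        congr 1
        have hmem : ((s[k-1]'(by omega)).1, pvRank s (s[k-1]'(by omega)).2)
            ∈ (s.take k).map (fun q => (q.1, pvRank s q.2)) := by
          apply List.mem_map.mpr
          refine ⟨s[k-1]'(by omega), ?_, rfl⟩
          have : (s.take k)[k-1]'(by simp [List.length_take]; omega) = s[k-1]'(by omega) :=
            List.getElem_take ..
          rw [← this]; exact List.getElem_mem _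
        have hknd : ((PySem.Dict.mk ((s.take k).map (fun q => (q.1, pvRank s q.2)))).keys).Nodup := by
          rw [PySem.Dict.keys_mk, List.map_map]
          have hcomp : ((fun p : String × Int => p.1) ∘ fun q : String × Int => (q.1, pvRank s q.2)) = Prod.fst := by
            funext q; rfl
          rw [hcomp]
          exact hn.sublist (List.Sublist.map _ (List.take_sublist _ _))
        rw [PySem.Dict.getD_of_mem_items _ hmem hknd]
        rw [htie]
      · -- new-value branch: rank is k+1
        have hnt : k = 0 ∨ s[k].2 ≠ (s[k - 1]'(by omega)).2 := by
          by_cases hk0 : k = 0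
          · exact Or.inl hk0
          · right
            intro heq
            apply hc
            constructor
            · exact_mod_cast Nat.pos_of_ne_zero hk0
            · have hcast : (k : Int) - 1 = ((k - 1 : Nat) : Int) := by omega
              rw [hcast, PySem.List.pyGetD_natCast,
                List.getD_eq_getElem s _ (by omega)]
              exact heq
        have : pvRank s s[k].2 = (k : Int) + 1 := by
          unfold pvRank
          rw [pvCount_eq s hs k hk' hnt]
          omega
        rw [this]
    dsimp only
    rw [hval]
    have hdict : (PySem.Dict.mk ((s.take k).map (fun q => (q.1, pvRank s q.2)))).insert s[k].1 (pvRank s s[k].2)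
        = PySem.Dict.mk ((s.take (k+1)).map (fun q => (q.1, pvRank s q.2))) := by
      apply PySem.Dict.ext
      rw [PySem.Dict.items_insert_of_not_contains _ _ hfresh]
      have : s.take (k+1) = s.take k ++ [s[k]] := by
        rw [List.take_add_one, List.getElem?_eq_getElem hk']
        rfl
      rw [this, List.map_append]
      rfl
    have hcur : (k : Int) + 1 + 1 = ((k + 1 : Nat) : Int) + 1 := by push_cast; ring
    have hstart : (k : Int) + 1 = ((k + 1 : Nat) : Int) := by push_cast; ring
    rw [hdict, hcur, hstart]
    exact ih (k+1) (by omega) (by omega)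

-- both inner loops produce the same items list
theorem pvInner_eq (pairs : List (String × Int)) (hn : (pairs.map Prod.fst).Nodup) :
    (((PySem.List.enumerate (PySem.List.sorted pairs (fun x => x.2) false)).foldl
      (fun (st : PySem.Dict String Int × Int) iv =>
        let i := iv.1; let name := iv.2.1; let value := iv.2.2
        let ranks :=
          if 0 < i ∧ value = (PySem.List.pyGetD (PySem.List.sorted pairs (fun x => x.2) false) (i - 1) ("", 0)).2 then
            st.1.insert name (st.1.getD (PySem.List.pyGetD (PySem.List.sorted pairs (fun x => x.2) false) (i - 1) ("", 0)).1 0)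
          else
            st.1.insert name st.2
        (ranks, st.2 + 1))
      (PySem.Dict.empty, (1 : Int))).1).items
    = ((PySem.List.sorted pairs (fun p => p.2) false).foldl
        (fun d q => d.insert q.1 (1 + (pairs.countP (fun r => decide (r.2 < q.2)) : Int)))
        PySem.Dict.empty).items := by
  have hperm := PySem.List.sorted_perm pairs (fun x => x.2) false
  have hs := PySem.List.sorted_pairwise pairs (fun x : String × Int => x.2)
  have hnods : ((PySem.List.sorted pairs (fun x => x.2) false).map Prod.fst).Nodup :=
    ((hperm.map Prod.fst).nodup_iff).mpr hn
  -- A's loop: instantiate the invariant at k = 0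
  have hA := pvLoopA_inv (PySem.List.sorted pairs (fun x => x.2) false) hs hnods 0 (by omega)
  simp only [List.drop_zero, List.take_zero, List.map_nil, Nat.cast_zero, zero_add] at hA
  -- B's loop: a fold inserting fresh distinct keys appends
  have hB := PySem.Dict.items_foldl_insert_fresh (PySem.List.sorted pairs (fun x => x.2) false)
      (fun q : String × Int => q.1)
      (fun q : String × Int => 1 + (pairs.countP (fun r => decide (r.2 < q.2)) : Int))
      PySem.Dict.empty
      (fun a _ => PySem.Dict.contains_empty _)
      (by simpa using hnods)
  have heq : (PySem.List.sorted pairs (fun x => x.2) false).map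
        (fun q => (q.1, pvRank (PySem.List.sorted pairs (fun x => x.2) false) q.2))
      = (PySem.List.sorted pairs (fun x => x.2) false).map
        (fun q : String × Int => ((fun q : String × Int => q.1) q,
          (fun q : String × Int => 1 + (pairs.countP (fun r => decide (r.2 < q.2)) : Int)) q)) := by
    apply List.map_congr_left
    intro q _
    simp only [pvRank]
    rw [hperm.countP_eq]
  exact (congrArg PySem.Dict.items hA).trans (heq.trans hB.symm)

-- ===== VERDICT (by name: the statement is the Claim_ definition above) =====
theorem rank_datasets_by_property_spec : Claim_equal_rank_datasets_by_property := by
  intro dps fns _ hpre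
  unfold Spec_rank_datasets_by_property
  unfold rank_datasets_by_property rank_datasets_by_property_alt
  congr 1
  apply PySem.List.foldl_congr_mem
  intro acc f hf
  simp only []
  congr 1
  exact pvInner_eq (pvCollect dps f) (pvCollect_names_nodup dps f hpre.1)
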